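-- pv_equiv track=rewrite | github.com/daniel-reich/turbo-robot | uWpS5xMjzZFAkiQzL_9.py | odds_vs_evens
-- ===== SOURCE A (Python) =====
-- def odds_vs_evens(num):
--     res = [int(x) for x in str(num)]
--     odds=[]
--     evens=[]
--     for i in res:
--         if i %2==0:
--             evens.append(i)
--         else:
--             odds.append(i)
--     if sum(odds)>sum(evens):
--         return('odd')
--     elif sum(odds)==sum(evens):
--         return('equal')
--     else:
--         return('even')
-- ===== SOURCE B (Python) =====
-- def odds_vs_evens(num):
--     total = 0
--     for x in str(num):
--         d = int(x)
--         if d % 2 == 0: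
--             total -= d
--         else:
--             total += d
--     if total > 0:
--         return 'odd'
--     elif total == 0:
--         return 'equal'
--     else:
--         return 'even'
-- ===== Notes on version B (the rewrite author's own statement) =====
-- stated objective: simpler
-- what changed: Replaces the two accumulated lists and their repeated sums with a single signed running total over the digits (add odd, subtract even) and a sign test at the end.
import Mathlib
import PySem

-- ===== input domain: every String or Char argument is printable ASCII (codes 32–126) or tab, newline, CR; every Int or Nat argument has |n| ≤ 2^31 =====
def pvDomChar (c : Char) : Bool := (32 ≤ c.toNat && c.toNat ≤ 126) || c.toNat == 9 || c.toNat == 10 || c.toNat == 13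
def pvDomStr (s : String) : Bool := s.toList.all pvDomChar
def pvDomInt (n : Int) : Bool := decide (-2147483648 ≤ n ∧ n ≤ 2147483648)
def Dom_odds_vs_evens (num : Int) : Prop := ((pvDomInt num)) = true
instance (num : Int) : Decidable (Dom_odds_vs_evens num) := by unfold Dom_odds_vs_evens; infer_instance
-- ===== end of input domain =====

-- B replaces A's two digit lists and their sums with one signed running total (add odd digits,
-- subtract even ones) and a sign test: a simpler decomposition of the same comparison.


-- ===== PORT A =====
-- int(x) on a one-character string: exact on digit chars (Pre_ restricts num ≥ 0,
-- so str(num) consists of digits only).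
def pyDigit (c : Char) : Int := (c.toNat : Int) - 48

def odds_vs_evens (num : Int) : String :=
  let res := (PySem.Int.toStr num).toList.map pyDigit
  let p := res.foldl
    (fun (acc : List Int × List Int) i =>
      if PySem.Int.mod i 2 = 0 then (acc.1, acc.2 ++ [i]) else (acc.1 ++ [i], acc.2))
    ([], [])
  if p.1.sum > p.2.sum then "odd"
  else if p.1.sum = p.2.sum then "equal"
  else "even"

-- ===== PORT B =====
def odds_vs_evens_alt (num : Int) : String :=
  let t := (PySem.Int.toStr num).toList.foldl
    (fun (t : Int) x =>
      let d := pyDigit x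
      if PySem.Int.mod d 2 = 0 then t - d else t + d) 0
  if t > 0 then "odd"
  else if t = 0 then "equal"
  else "even"

-- ===== PRECONDITION & SPEC =====
-- Both A and B raise ValueError on negative num (int('-')); Pre_ excludes exactly those inputs.
def Pre_odds_vs_evens (num : Int) : Prop := 0 ≤ num
instance (num : Int) : Decidable (Pre_odds_vs_evens num) := by unfold Pre_odds_vs_evens; infer_instance
def pvWitness_odds_vs_evens : Int := (1234)

def Spec_odds_vs_evens (num : Int) (out : String) : Prop := out = odds_vs_evens_alt num
instance (num : Int) (out : String) : Decidable (Spec_odds_vs_evens num out) := by unfold Spec_odds_vs_evens; infer_instance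

-- ===== CLAIM (what is proved, stated in full; the proofs are below) =====
def Claim_equal_odds_vs_evens : Prop := ∀ (num : Int), Dom_odds_vs_evens num → Pre_odds_vs_evens num → Spec_odds_vs_evens num (odds_vs_evens num)

-- ===== LEMMAS AND PROOFS =====

-- A's partition fold and B's signed fold, abstracted over the digit list.
def foldA (ds : List Int) (acc : List Int × List Int) : List Int × List Int :=
  ds.foldl
    (fun (acc : List Int × List Int) i =>
      if PySem.Int.mod i 2 = 0 then (acc.1, acc.2 ++ [i]) else (acc.1 ++ [i], acc.2)) acc

def foldB (ds : List Int) (t : Int) : Int :=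
  ds.foldl (fun t d => if PySem.Int.mod d 2 = 0 then t - d else t + d) t

theorem foldB_shift (ds : List Int) (t : Int) : foldB ds t = t + foldB ds 0 := by
  induction ds generalizing t with
  | nil => simp [foldB]
  | cons d ds ih =>
    rw [show foldB (d :: ds) t
          = foldB ds (if PySem.Int.mod d 2 = 0 then t - d else t + d) from rfl,
        show foldB (d :: ds) 0
          = foldB ds (if PySem.Int.mod d 2 = 0 then 0 - d else 0 + d) from rfl,
        ih (if PySem.Int.mod d 2 = 0 then t - d else t + d),
        ih (if PySem.Int.mod d 2 = 0 then 0 - d else 0 + d)]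
    by_cases h : PySem.Int.mod d 2 = 0
    · simp only [if_pos h]; ring
    · simp only [if_neg h]; ring

theorem foldA_sub (ds : List Int) (os es : List Int) :
    (foldA ds (os, es)).1.sum - (foldA ds (os, es)).2.sum = os.sum - es.sum + foldB ds 0 := by
  induction ds generalizing os es with
  | nil => simp [foldA, foldB]
  | cons d ds ih =>
    rw [show foldA (d :: ds) (os, es)
          = foldA ds (if PySem.Int.mod d 2 = 0 then (os, es ++ [d]) else (os ++ [d], es)) from rfl,
        show foldB (d :: ds) 0
          = foldB ds (if PySem.Int.mod d 2 = 0 then 0 - d else 0 + d) from rfl,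
        foldB_shift]
    by_cases h : PySem.Int.mod d 2 = 0
    · simp only [if_pos h]; rw [ih]; simp [List.sum_append]; ring
    · simp only [if_neg h]; rw [ih]; simp [List.sum_append]; ring

-- ===== VERDICT (by name: the statement is the Claim_ definition above) =====
theorem odds_vs_evens_spec : Claim_equal_odds_vs_evens := by
  intro num _ _
  unfold Spec_odds_vs_evens odds_vs_evens odds_vs_evens_alt
  set ds := (PySem.Int.toStr num).toList.map pyDigit with hds
  have hB : (PySem.Int.toStr num).toList.foldl
      (fun (t : Int) x =>
        let d := pyDigit x
        if PySem.Int.mod d 2 = 0 then t - d else t + d) 0 = foldB ds 0 := by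
    rw [hds, foldB, List.foldl_map]
  have hA : (ds.foldl
      (fun (acc : List Int × List Int) i =>
        if PySem.Int.mod i 2 = 0 then (acc.1, acc.2 ++ [i]) else (acc.1 ++ [i], acc.2))
      ([], [])) = foldA ds ([], []) := rfl
  simp only [hA, hB]
  have key := foldA_sub ds [] []
  simp only [List.sum_nil, sub_zero, zero_add] at key
  set p := foldA ds ([], [])
  set t := foldB ds 0
  by_cases h1 : p.1.sum > p.2.sum
  · rw [if_pos h1, if_pos (by omega : t > 0)]
  · rw [if_neg h1]
    by_cases h2 : p.1.sum = p.2.sum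
    · rw [if_pos h2, if_neg (by omega : ¬ t > 0), if_pos (by omega : t = 0)]
    · rw [if_neg h2, if_neg (by omega : ¬ t > 0), if_neg (by omega : ¬ t = 0)]
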